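-- pv_equiv track=rewrite | github.com/StevenUST/GuanDanZero | cardcomb.py | isLargerThanRank
-- ===== SOURCE A (Python) =====
-- from typing import Iterable, Final, Tuple, Dict, Optional
--
-- def isLargerThanRank(r1: int, r2: int, level: Optional[int]) -> bool:
--     '''
--     return @param r1 > @param r2 base on @param level
--     '''
--     if r1 == r2:
--         return False
--     if level is None or r1 == 0 or r2 == 0:
--         return r1 > r2
--     else:
--         t = [i for i in range(1, 14)]
--         if level != 13:
--             _ = t.pop(level - 1)
--             t.insert(12, level)
--         t.extend([14, 15, 16])
--         return t.index(r1) > t.index(r2)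
-- ===== SOURCE B (Python) =====
-- def isLargerThanRank(r1: int, r2: int, level):
--     '''
--     return r1 > r2 based on level, via an arithmetic ranking key
--     (no table built, no linear scans)
--     '''
--     if r1 == r2:
--         return False
--     if level is None or r1 == 0 or r2 == 0:
--         return r1 > r2
--
--     def key(r):
--         if r == level:
--             return 12
--         if r < level:
--             return r - 1
--         if r <= 13:
--             return r - 2
--         return r - 1
--
--     return key(r1) > key(r2)
-- ===== Notes on version B (the rewrite author's own statement) =====
-- stated objective: simpler
-- what changed: Replaces A's construction of a 16-element rank table (list build, pop, insert, extend) and two linear .index() scans with a closed-form arithmetic key function compared directly; Pre_ excludes only inputs on which A raises (pop IndexError for level outside [-12,13], .index ValueError for a rank absent from the table).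
import Mathlib
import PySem

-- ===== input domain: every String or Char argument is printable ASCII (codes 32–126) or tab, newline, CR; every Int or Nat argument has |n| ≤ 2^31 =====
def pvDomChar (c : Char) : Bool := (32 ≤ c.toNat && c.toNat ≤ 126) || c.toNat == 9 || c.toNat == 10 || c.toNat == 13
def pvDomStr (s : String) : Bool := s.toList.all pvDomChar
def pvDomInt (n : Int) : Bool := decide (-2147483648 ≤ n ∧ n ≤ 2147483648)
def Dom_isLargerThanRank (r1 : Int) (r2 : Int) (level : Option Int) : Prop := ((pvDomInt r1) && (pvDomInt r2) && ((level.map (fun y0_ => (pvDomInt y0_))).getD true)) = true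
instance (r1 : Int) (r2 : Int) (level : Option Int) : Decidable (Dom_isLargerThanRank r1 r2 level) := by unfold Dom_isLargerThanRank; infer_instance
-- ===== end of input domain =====

-- B replaces A's list construction and two .index() scans with a closed-form arithmetic ranking key (objective: simpler).


-- ===== PORT A =====
def isLargerThanRank (r1 : Int) (r2 : Int) (level : Option Int) : Bool :=
  if r1 = r2 then false
  else
    match level with
    | none => decide (r1 > r2)
    | some lv =>
      if r1 = 0 || r2 = 0 then decide (r1 > r2)
      else
        let t := PySem.List.pyRange 1 14 1
        let t :=
          if lv ≠ 13 then
            match PySem.List.pop? t (lv - 1) with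
            | some (_, t') => PySem.List.insert t' 12 lv
            | none => []          -- Python raises IndexError here; excluded by Pre_
          else t
        let t := t ++ [14, 15, 16]
        match PySem.List.index? t r1, PySem.List.index? t r2 with
        | some i1, some i2 => decide (i1 > i2)
        | _, _ => false           -- Python raises ValueError here; excluded by Pre_

-- ===== PORT B =====
def pvKey (lv : Int) (r : Int) : Int :=
  if r = lv then 12
  else if r < lv then r - 1
  else if r ≤ 13 then r - 2
  else r - 1

def isLargerThanRank_alt (r1 : Int) (r2 : Int) (level : Option Int) : Bool :=
  if r1 = r2 then false
  else
    match level with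
    | none => decide (r1 > r2)
    | some lv =>
      if r1 = 0 || r2 = 0 then decide (r1 > r2)
      else decide (pvKey lv r1 > pvKey lv r2)

-- ===== PRECONDITION & SPEC =====
-- Pre_ excludes exactly the inputs on which A raises: IndexError (level outside [-12,13] and ≠ 13)
-- from t.pop(level-1), or ValueError from t.index when a rank is not in the built table.
-- membership in A's built table: the rank itself at the trump slot, or 1..16 minus the popped rank
def pvMemT (lv : Int) (r : Int) : Bool :=
  r == lv || (1 ≤ r && r ≤ 16 && r != (if 1 ≤ lv then lv else lv + 13))

def Pre_isLargerThanRank (r1 : Int) (r2 : Int) (level : Option Int) : Prop :=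
  ∀ lv ∈ level, r1 = r2 ∨ r1 = 0 ∨ r2 = 0 ∨
      (-12 ≤ lv ∧ lv ≤ 13 ∧ pvMemT lv r1 = true ∧ pvMemT lv r2 = true)

instance (r1 : Int) (r2 : Int) (level : Option Int) : Decidable (Pre_isLargerThanRank r1 r2 level) := by unfold Pre_isLargerThanRank; infer_instance

def pvWitness_isLargerThanRank : Int × Int × Option Int := (5, 9, some 9)

def Spec_isLargerThanRank (r1 : Int) (r2 : Int) (level : Option Int) (out : Bool) : Prop := out = isLargerThanRank_alt r1 r2 level
instance (r1 : Int) (r2 : Int) (level : Option Int) (out : Bool) : Decidable (Spec_isLargerThanRank r1 r2 level out) := by unfold Spec_isLargerThanRank; infer_instance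

-- ===== CLAIM (what is proved, stated in full; the proofs are below) =====
def Claim_equal_isLargerThanRank : Prop := ∀ (r1 : Int) (r2 : Int) (level : Option Int), Dom_isLargerThanRank r1 r2 level → Pre_isLargerThanRank r1 r2 level → Spec_isLargerThanRank r1 r2 level (isLargerThanRank r1 r2 level)

-- ===== LEMMAS AND PROOFS =====

set_option maxHeartbeats 4000000 in
-- the interesting case, checked exhaustively over the finite ranges Pre_ admits
theorem pv_main : ∀ lv ∈ Finset.Icc (-12 : Int) 13, ∀ r1 ∈ Finset.Icc (-12 : Int) 16,
    ∀ r2 ∈ Finset.Icc (-12 : Int) 16, r1 ≠ r2 → r1 ≠ 0 → r2 ≠ 0 →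
    pvMemT lv r1 = true → pvMemT lv r2 = true →
    isLargerThanRank r1 r2 (some lv) = isLargerThanRank_alt r1 r2 (some lv) := by
  decide

-- ===== VERDICT (by name: the statement is the Claim_ definition above) =====
theorem isLargerThanRank_spec : Claim_equal_isLargerThanRank := by
  intro r1 r2 level _ hpre
  unfold Spec_isLargerThanRank
  match level with
  | none => rfl
  | some lv =>
    by_cases h12 : r1 = r2
    · simp [isLargerThanRank, isLargerThanRank_alt, h12]
    · by_cases h1 : r1 = 0
      · simp [isLargerThanRank, isLargerThanRank_alt, h1]
      · by_cases h2 : r2 = 0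
        · simp [isLargerThanRank, isLargerThanRank_alt, h1, h2]
        · rcases hpre lv (by simp) with h | h | h | ⟨hlo, hhi, hm1, hm2⟩ <;> try contradiction
          have b1 : r1 ∈ Finset.Icc (-12 : Int) 16 := by
            simp only [pvMemT, Bool.or_eq_true, beq_iff_eq, Bool.and_eq_true, bne_iff_ne,
              decide_eq_true_eq] at hm1
            simp only [Finset.mem_Icc]; omega
          have b2 : r2 ∈ Finset.Icc (-12 : Int) 16 := by
            simp only [pvMemT, Bool.or_eq_true, beq_iff_eq, Bool.and_eq_true, bne_iff_ne,
              decide_eq_true_eq] at hm2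
            simp only [Finset.mem_Icc]; omega
          exact pv_main lv (by simp [Finset.mem_Icc]; omega) r1 b1 r2 b2 h12 h1 h2 hm1 hm2
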